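-- pv_equiv track=rewrite | github.com/manujgarg10/music-webapp-mvp | app/services/analysis.py | clean_progression
-- ===== SOURCE A (Python) =====
-- def clean_progression(chords: list[str]) -> list[str]:
--     if not chords:
--         return []
--
--     # 1. Remove immediate duplicates
--     deduped = []
--     for chord in chords:
--         if not deduped or chord != deduped[-1]:
--             deduped.append(chord)
--
--     # 2. Normalize major/minor flicker (B vs Bm → Bm)
--     normalized = []
--     for chord in deduped:
--         if normalized:
--             prev = normalized[-1]
--             if chord.rstrip("m") == prev.rstrip("m"):
--                 chord = chord.rstrip("m") + "m"
--         normalized.append(chord)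
--
--     # 3. Collapse long repeats (Bm Bm Bm → Bm)
--     collapsed = []
--     for chord in normalized:
--         if not collapsed or chord != collapsed[-1]:
--             collapsed.append(chord)
--
--     # 4. Remove weak starting noise (like stray B before Bm)
--     if len(collapsed) >= 2:
--         first, second = collapsed[0], collapsed[1]
--         if first.rstrip("m") == second.rstrip("m"):
--             collapsed = collapsed[1:]
--
--     return collapsed[:8]
-- ===== SOURCE B (Python) =====
-- def clean_progression(chords: list[str]) -> list[str]:
--     if not chords:
--         return []
--
--     # Single fused pass: inline immediate-dedup (last_raw), major/minor
--     # normalization against the running output, and repeat collapse.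
--     result = []
--     last_raw = None
--     for chord in chords:
--         if chord == last_raw:
--             continue
--         last_raw = chord
--         if result:
--             base = chord.rstrip("m")
--             if base == result[-1].rstrip("m"):
--                 chord = base + "m"
--             if chord != result[-1]:
--                 result.append(chord)
--         else:
--             result.append(chord)
--
--     # Remove weak starting noise (like stray B before Bm)
--     if len(result) >= 2 and result[0].rstrip("m") == result[1].rstrip("m"):
--         result = result[1:]
--
--     return result[:8]
-- ===== Notes on version B (the rewrite author's own statement) =====
-- stated objective: simpler
-- what changed: Fuses A's three sequential passes (immediate dedup, major/minor normalization, repeat collapse) into one loop maintaining the output list plus a last-raw-chord marker, eliminating the two intermediate lists; the weak-start trim and [:8] slice are kept.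
import Mathlib
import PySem

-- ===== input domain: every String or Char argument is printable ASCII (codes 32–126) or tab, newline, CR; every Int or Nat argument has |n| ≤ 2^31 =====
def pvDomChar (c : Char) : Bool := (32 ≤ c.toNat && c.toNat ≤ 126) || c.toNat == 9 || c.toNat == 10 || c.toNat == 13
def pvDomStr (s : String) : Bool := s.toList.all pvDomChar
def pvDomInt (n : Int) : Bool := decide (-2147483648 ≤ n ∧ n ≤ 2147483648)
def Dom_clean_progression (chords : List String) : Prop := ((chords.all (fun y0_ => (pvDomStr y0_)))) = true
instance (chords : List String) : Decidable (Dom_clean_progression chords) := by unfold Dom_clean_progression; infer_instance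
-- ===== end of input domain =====

-- B fuses A's three sequential dedup/normalize/collapse passes into one loop
-- over `chords` maintaining the output list and a last-raw-chord marker
-- (objective: simpler — one traversal instead of three, no intermediate lists).

-- shared helper: Python's s.rstrip("m") (drop all trailing 'm' characters)
def pvRstripM (s : String) : String :=
  String.ofList ((s.toList.reverse.dropWhile (fun ch => ch == 'm')).reverse)

-- ===== PORT A =====
-- passes 1 and 3 of A are the same loop body: append unless equal to acc[-1]
def pvDstep (acc : List String) (chord : String) : List String :=
  match acc.getLast? with
  | none => acc ++ [chord]
  | some p => if chord ≠ p then acc ++ [chord] else acc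

-- pass 2 of A: normalize major/minor flicker against acc[-1]
def pvNstep (acc : List String) (chord : String) : List String :=
  match acc.getLast? with
  | none => acc ++ [chord]
  | some p =>
      let chord := if pvRstripM chord = pvRstripM p then pvRstripM chord ++ "m" else chord
      acc ++ [chord]

def clean_progression (chords : List String) : List String :=
  if chords = [] then []
  else
    let deduped := chords.foldl pvDstep []
    let normalized := deduped.foldl pvNstep []
    let collapsed := normalized.foldl pvDstep []
    let collapsed :=
      match collapsed with
      | first :: second :: _ =>
          if pvRstripM first = pvRstripM second then collapsed.tail else collapsed
      | _ => collapsed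
    collapsed.take 8

-- ===== PORT B =====
-- B's fused loop body over state (result, last_raw)
def pvBstep (st : List String × Option String) (chord : String) : List String × Option String :=
  if some chord = st.2 then st
  else
    match st.1.getLast? with
    | none => (st.1 ++ [chord], some chord)
    | some p =>
        let base := pvRstripM chord
        let ch := if base = pvRstripM p then base ++ "m" else chord
        if ch ≠ p then (st.1 ++ [ch], some chord) else (st.1, some chord)

def clean_progression_alt (chords : List String) : List String :=
  if chords = [] then []
  else
    let result := (chords.foldl pvBstep ([], none)).1
    let result :=
      if result.length ≥ 2 ∧ pvRstripM result[0]! = pvRstripM result[1]! then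
        result.tail
      else result
    result.take 8

-- ===== PRECONDITION & SPEC =====
def Spec_clean_progression (chords : List String) (out : List String) : Prop := out = clean_progression_alt chords
instance (chords : List String) (out : List String) : Decidable (Spec_clean_progression chords out) := by unfold Spec_clean_progression; infer_instance

-- ===== CLAIM (what is proved, stated in full; the proofs are below) =====
def Claim_equal_clean_progression : Prop := ∀ (chords : List String), Dom_clean_progression chords → Spec_clean_progression chords (clean_progression chords)

-- ===== LEMMAS AND PROOFS =====

lemma last_dstep (acc : List String) (c : String) : (pvDstep acc c).getLast? = some c := by
  unfold pvDstep
  cases h : acc.getLast? with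
  | none => simp
  | some p =>
      by_cases hc : c = p
      · simp [hc, h]
      · simp [hc]

lemma foldl_dstep_last (ys : List String) :
    (ys.foldl pvDstep []).getLast? = ys.getLast? := by
  induction ys using List.reverseRecOn with
  | nil => rfl
  | append_singleton xs c ih => simp [List.foldl_append, last_dstep]

-- main invariant: B's fused fold equals A's three-pass pipeline plus the last raw chord
lemma pvB_main (xs : List String) :
    xs.foldl pvBstep ([], none) =
      (((xs.foldl pvDstep []).foldl pvNstep []).foldl pvDstep [], xs.getLast?) := by
  induction xs using List.reverseRecOn with
  | nil => rfl
  | append_singleton xs c ih =>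
      simp only [List.foldl_append, List.foldl_cons, List.foldl_nil, ih]
      have hD := foldl_dstep_last xs
      cases hDL : (xs.foldl pvDstep []).getLast? with
      | none =>
          have hnil : xs.foldl pvDstep [] = [] := List.getLast?_eq_none_iff.mp hDL
          have hxs : xs.getLast? = none := by rw [← hD, hDL]
          simp [pvBstep, pvDstep, pvNstep, hnil, hxs]
      | some p0 =>
          have hxs : xs.getLast? = some p0 := by rw [← hD, hDL]
          by_cases hc : c = p0
          · -- dedup skip in both
            simp [pvBstep, pvDstep, hxs, hDL, hc]
          · -- dedup appends
            have hskip : ¬ some c = xs.getLast? := by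
              rw [hxs]; simp [hc]
            have hDstep : pvDstep (xs.foldl pvDstep []) c = xs.foldl pvDstep [] ++ [c] := by
              simp [pvDstep, hDL, hc]
            rw [hDstep, List.foldl_append, List.foldl_cons, List.foldl_nil]
            set ys := (xs.foldl pvDstep []).foldl pvNstep [] with hys
            have hCL : (ys.foldl pvDstep []).getLast? = ys.getLast? := foldl_dstep_last ys
            cases hNL : ys.getLast? with
            | none =>
                have hynil : ys = [] := List.getLast?_eq_none_iff.mp hNL
                simp [pvBstep, pvNstep, pvDstep, hynil, hskip]
            | some pn =>
                have hCL' : (ys.foldl pvDstep []).getLast? = some pn := by rw [hCL, hNL]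
                simp only [pvBstep, pvNstep, hskip, hNL, hCL', List.foldl_append,
                  List.foldl_cons, List.foldl_nil, pvDstep]
                split_ifs <;> simp_all [Prod.ext_iff]

lemma tails_eq (l : List String) :
    (match l with
     | first :: second :: _ =>
         if pvRstripM first = pvRstripM second then l.tail else l
     | _ => l) =
    (if l.length ≥ 2 ∧ pvRstripM l[0]! = pvRstripM l[1]! then l.tail else l) := by
  match l with
  | [] => simp
  | [a] => simp
  | a :: b :: rest =>
      by_cases h : pvRstripM a = pvRstripM b
      · simp [h]
      · simp [h]

-- ===== VERDICT (by name: the statement is the Claim_ definition above) =====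
theorem clean_progression_spec : Claim_equal_clean_progression := by
  intro chords _
  unfold Spec_clean_progression clean_progression clean_progression_alt
  by_cases h : chords = []
  · simp [h]
  · simp only [if_neg h, pvB_main, tails_eq]
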